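-- pv_equiv track=rewrite | github.com/sergioruizj/Practica_Tema1 | Tema3_Ejercicio4.py | emparejar_botellas_corchos
-- ===== SOURCE A (Python) =====
-- def emparejar_botellas_corchos(botellas, corchos) -> list:
--     if not botellas or not corchos:
--         return []
--
--     if len(botellas) == 1:
--         if (probar_corcho(botellas[0], corchos[0]) == "justo"):
--             return [(botellas[0], corchos[0])]
--         else:
--             return []
--
--
--     mitad = len(botellas) // 2
--     botella_mid = botellas[mitad]
--
--     botellas_izq, botellas_der = [], []
--     corchos_izq, corchos_der = [], []
--     parejas = []
--
--     for corcho in corchos: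
--         resultado = probar_corcho(botella_mid, corcho)
--         if resultado == "pequeño":
--             corchos_izq.append(corcho)
--         elif resultado == "grande":
--             corchos_der.append(corcho)
--         else:
--             parejas.append((botella_mid, corcho))
--
--
--     for botella in botellas:
--         if botella != botella_mid:
--             if botella < botella_mid:
--                 botellas_izq.append(botella)
--             else:
--                 botellas_der.append(botella)
--
--
--     parejas_izq = emparejar_botellas_corchos(botellas_izq, corchos_izq)
--     parejas_der = emparejar_botellas_corchos(botellas_der, corchos_der)
--
--     return parejas + parejas_izq + parejas_der
--
-- def probar_corcho(botella, corcho) -> str: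
--     if corcho < botella:
--         return "pequeño"
--     elif corcho > botella:
--         return "grande"
--     else:
--         return "justo"
-- ===== SOURCE B (Python) =====
-- def emparejar_botellas_corchos(botellas, corchos) -> list:
--     resultado = []
--     stack = [(botellas, corchos)]
--     while stack:
--         bs, cs = stack.pop()
--         if not bs or not cs:
--             continue
--         if len(bs) == 1:
--             if bs[0] == cs[0]:
--                 resultado.append((bs[0], cs[0]))
--             continue
--         mid = bs[len(bs) // 2]
--         resultado.extend((mid, c) for c in cs if c == mid)
--         stack.append(([b for b in bs if b > mid], [c for c in cs if c > mid]))
--         stack.append(([b for b in bs if b < mid], [c for c in cs if c < mid]))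
--     return resultado
-- ===== Notes on version B (the rewrite author's own statement) =====
-- stated objective: alternative
-- what changed: Replaces the recursive quicksort-style pairing by an explicit work-stack loop (push right then left sub-problem, emit pivot matches immediately) with the partitions expressed as comprehensions/filters instead of append loops.
import Mathlib
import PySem

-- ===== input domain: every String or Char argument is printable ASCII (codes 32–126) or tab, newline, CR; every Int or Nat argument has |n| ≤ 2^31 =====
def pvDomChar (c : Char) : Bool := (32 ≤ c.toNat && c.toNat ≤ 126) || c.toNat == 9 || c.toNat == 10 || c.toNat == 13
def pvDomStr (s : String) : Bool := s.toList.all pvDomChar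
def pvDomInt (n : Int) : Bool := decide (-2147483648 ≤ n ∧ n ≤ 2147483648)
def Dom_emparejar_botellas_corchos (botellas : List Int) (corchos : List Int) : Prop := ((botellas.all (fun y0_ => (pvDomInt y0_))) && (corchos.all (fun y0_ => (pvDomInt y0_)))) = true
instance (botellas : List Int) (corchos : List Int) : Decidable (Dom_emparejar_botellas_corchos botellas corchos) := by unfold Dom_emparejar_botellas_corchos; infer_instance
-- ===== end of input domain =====

-- B replaces A's recursion by an explicit work stack (push right then left) with
-- filter-comprehension partitions; equal return value, no speed claim.

-- ===== PORT A =====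
def probarCorcho (botella : Int) (corcho : Int) : String :=
  if corcho < botella then "pequeño"
  else if corcho > botella then "grande"
  else "justo"

-- one iteration of A's 'for corcho in corchos' loop, state (corchos_izq, corchos_der, parejas)
def corchoStep (mid : Int) (s : List Int × List Int × List (Int × Int)) (c : Int) :
    List Int × List Int × List (Int × Int) :=
  let r := probarCorcho mid c
  if r == "pequeño" then (s.1 ++ [c], s.2.1, s.2.2)
  else if r == "grande" then (s.1, s.2.1 ++ [c], s.2.2)
  else (s.1, s.2.1, s.2.2 ++ [(mid, c)])

def splitCorchos (mid : Int) (corchos : List Int) :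
    List Int × List Int × List (Int × Int) :=
  corchos.foldl (corchoStep mid) ([], [], [])

-- the 'for botella in botellas' loop of A, state (botellas_izq, botellas_der)
def splitBotellas (mid : Int) (botellas : List Int) : List Int × List Int :=
  botellas.foldl (fun s b =>
    if b ≠ mid then
      (if b < mid then (s.1 ++ [b], s.2) else (s.1, s.2 ++ [b]))
    else s) ([], [])

-- characterisation of the botella loop, needed for A's termination
theorem splitBotellas_eq (mid : Int) (l : List Int) :
    splitBotellas mid l =
      (l.filter (fun b => b != mid && decide (b < mid)),
       l.filter (fun b => b != mid && !decide (b < mid))) := by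
  suffices h : ∀ acc : List Int × List Int,
      l.foldl (fun s b =>
        if b ≠ mid then
          (if b < mid then (s.1 ++ [b], s.2) else (s.1, s.2 ++ [b]))
        else s) acc =
      (acc.1 ++ l.filter (fun b => b != mid && decide (b < mid)),
       acc.2 ++ l.filter (fun b => b != mid && !decide (b < mid))) by
    simpa [splitBotellas] using h ([], [])
  induction l with
  | nil => intro acc; simp
  | cons b t ih =>
    intro acc
    rw [List.foldl_cons]
    by_cases hb : b = mid
    · rw [show (if b ≠ mid then
          (if b < mid then (acc.1 ++ [b], acc.2) else (acc.1, acc.2 ++ [b]))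
        else acc) = acc from by simp [hb]]
      rw [ih]; simp [hb]
    · by_cases hlt : b < mid
      · rw [show (if b ≠ mid then
            (if b < mid then (acc.1 ++ [b], acc.2) else (acc.1, acc.2 ++ [b]))
          else acc) = (acc.1 ++ [b], acc.2) from by simp [hb, hlt]]
        rw [ih]; simp [hb, hlt]
      · rw [show (if b ≠ mid then
            (if b < mid then (acc.1 ++ [b], acc.2) else (acc.1, acc.2 ++ [b]))
          else acc) = (acc.1, acc.2 ++ [b]) from by simp [hb, hlt]]
        rw [ih]; simp [hb, hlt]

theorem length_filter_lt {p : Int → Bool} {l : List Int} {x : Int}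
    (hx : x ∈ l) (hp : p x = false) : (l.filter p).length < l.length := by
  rw [← List.countP_eq_length_filter]
  exact List.countP_lt_length_iff.mpr ⟨x, hx, hp⟩

theorem splitBotellas_fst_lt (mid : Int) (l : List Int) (hm : mid ∈ l) :
    (splitBotellas mid l).1.length < l.length := by
  rw [splitBotellas_eq]
  exact length_filter_lt hm (by simp)

theorem splitBotellas_snd_lt (mid : Int) (l : List Int) (hm : mid ∈ l) :
    (splitBotellas mid l).2.length < l.length := by
  rw [splitBotellas_eq]
  exact length_filter_lt hm (by simp)

theorem getD_mem_of_lt {l : List Int} {i : Nat} (h : i < l.length) :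
    l.getD i 0 ∈ l := by
  rw [List.getD_eq_getElem l 0 h]; exact List.getElem_mem h

theorem half_lt {n : Nat} (h : 0 < n) : n / 2 < n := Nat.div_lt_self h (by norm_num)

def emparejar_botellas_corchos (botellas : List Int) (corchos : List Int) : List (Int × Int) :=
  if botellas.isEmpty || corchos.isEmpty then []
  else if botellas.length == 1 then
    if probarCorcho (botellas.headD 0) (corchos.headD 0) == "justo" then
      [(botellas.headD 0, corchos.headD 0)]
    else []
  else
    let mitad := botellas.length / 2
    let botella_mid := botellas.getD mitad 0
    let sc := splitCorchos botella_mid corchos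
    let sb := splitBotellas botella_mid botellas
    sc.2.2 ++ emparejar_botellas_corchos sb.1 sc.1 ++ emparejar_botellas_corchos sb.2 sc.2.1
termination_by botellas.length
decreasing_by
  · exact splitBotellas_fst_lt _ _ (getD_mem_of_lt (half_lt (by
      rcases botellas with _ | _ <;> simp_all)))
  · exact splitBotellas_snd_lt _ _ (getD_mem_of_lt (half_lt (by
      rcases botellas with _ | _ <;> simp_all)))

-- arithmetic fact for B's stack measure (cited by loopB's decreasing_by)
theorem pow3_stack_lt (x y L s : Nat) (hx : x < L) (hy : y < L) :
    3 ^ x + (3 ^ y + s) < 3 ^ L + s := by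
  have e1 : 3 ^ x ≤ 3 ^ (L - 1) := Nat.pow_le_pow_right (by norm_num) (by omega)
  have e2 : 3 ^ y ≤ 3 ^ (L - 1) := Nat.pow_le_pow_right (by norm_num) (by omega)
  have e3 : 3 ^ L = 3 ^ (L - 1) * 3 := by
    conv_lhs => rw [show L = (L - 1) + 1 from by omega]
    rw [pow_succ]
  have e4 : 1 ≤ 3 ^ (L - 1) := Nat.one_le_pow _ _ (by norm_num)
  omega

-- ===== PORT B =====
-- the 'while stack' loop of Source B; the head of the list is the top of the stack
def loopB : List (List Int × List Int) → List (Int × Int) → List (Int × Int)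
  | [], res => res
  | (bs, cs) :: rest, res =>
    if bs.isEmpty || cs.isEmpty then loopB rest res
    else if bs.length == 1 then
      loopB rest (if bs.headD 0 == cs.headD 0 then res ++ [(bs.headD 0, cs.headD 0)] else res)
    else
      let mid := bs.getD (bs.length / 2) 0
      loopB ((bs.filter (fun b => decide (b < mid)), cs.filter (fun c => decide (c < mid)))
             :: (bs.filter (fun b => decide (mid < b)), cs.filter (fun c => decide (mid < c)))
             :: rest)
            (res ++ (cs.filter (fun c => c == mid)).map (fun c => (mid, c)))
termination_by stack _ => (stack.map (fun f => 3 ^ f.1.length)).sum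
decreasing_by
  · simp
  · simp
  · have hne : bs ≠ [] := by simp_all
    have h0 : 0 < bs.length := List.length_pos_iff.mpr hne
    have hm : bs.getD (bs.length / 2) 0 ∈ bs := getD_mem_of_lt (half_lt h0)
    simp only [List.map_cons, List.sum_cons, List.length_unattach,
      ← List.countP_eq_length_filter]
    have h1 : List.countP (fun x : {x // x ∈ bs} => decide (↑x < bs.getD (bs.length / 2) 0)) bs.attach < bs.length := by
      have := (List.countP_lt_length_iff
        (p := fun x : {x // x ∈ bs} => decide (↑x < bs.getD (bs.length / 2) 0))).mpr
        ⟨⟨_, hm⟩, List.mem_attach _ _, by simp⟩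
      simpa using this
    have h2 : List.countP (fun x : {x // x ∈ bs} => decide (bs.getD (bs.length / 2) 0 < ↑x)) bs.attach < bs.length := by
      have := (List.countP_lt_length_iff
        (p := fun x : {x // x ∈ bs} => decide (bs.getD (bs.length / 2) 0 < ↑x))).mpr
        ⟨⟨_, hm⟩, List.mem_attach _ _, by simp⟩
      simpa using this
    exact pow3_stack_lt _ _ _ _ h1 h2

def emparejar_botellas_corchos_alt (botellas : List Int) (corchos : List Int) : List (Int × Int) :=
  loopB [(botellas, corchos)] []

-- ===== PRECONDITION & SPEC =====
def Spec_emparejar_botellas_corchos (botellas : List Int) (corchos : List Int) (out : List (Int × Int)) : Prop := out = emparejar_botellas_corchos_alt botellas corchos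
instance (botellas : List Int) (corchos : List Int) (out : List (Int × Int)) : Decidable (Spec_emparejar_botellas_corchos botellas corchos out) := by unfold Spec_emparejar_botellas_corchos; infer_instance

-- ===== CLAIM (what is proved, stated in full; the proofs are below) =====
def Claim_equal_emparejar_botellas_corchos : Prop := ∀ (botellas : List Int) (corchos : List Int), Dom_emparejar_botellas_corchos botellas corchos → Spec_emparejar_botellas_corchos botellas corchos (emparejar_botellas_corchos botellas corchos)

-- ===== LEMMAS AND PROOFS =====

theorem splitCorchos_eq (mid : Int) (l : List Int) :
    splitCorchos mid l =
      (l.filter (fun c => decide (c < mid)),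
       l.filter (fun c => decide (mid < c)),
       (l.filter (fun c => c == mid)).map (fun c => (mid, c))) := by
  suffices h : ∀ acc : List Int × List Int × List (Int × Int),
      l.foldl (corchoStep mid) acc =
      (acc.1 ++ l.filter (fun c => decide (c < mid)),
       acc.2.1 ++ l.filter (fun c => decide (mid < c)),
       acc.2.2 ++ (l.filter (fun c => c == mid)).map (fun c => (mid, c))) by
    simpa [splitCorchos] using h ([], [], [])
  induction l with
  | nil => intro acc; simp
  | cons c t ih =>
    intro acc
    rw [List.foldl_cons]
    rcases lt_trichotomy c mid with h | h | h
    · rw [show corchoStep mid acc c = (acc.1 ++ [c], acc.2.1, acc.2.2) from by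
        simp [corchoStep, probarCorcho, h]]
      rw [ih]; simp [h, ne_of_lt h, not_lt.mpr (le_of_lt h)]
    · rw [show corchoStep mid acc c = (acc.1, acc.2.1, acc.2.2 ++ [(mid, c)]) from by
        simp [corchoStep, probarCorcho, h]]
      rw [ih]; simp [h]
    · rw [show corchoStep mid acc c = (acc.1, acc.2.1 ++ [c], acc.2.2) from by
        simp [corchoStep, probarCorcho, h, not_lt.mpr (le_of_lt h)]]
      rw [ih]; simp [h, ne_of_gt h, not_lt.mpr (le_of_lt h)]

-- the B-side botella filters agree with A's partition (a value < mid is ≠ mid, etc.)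
theorem filter_lt_eq (mid : Int) (l : List Int) :
    l.filter (fun b => decide (b < mid)) = l.filter (fun b => b != mid && decide (b < mid)) := by
  apply List.filter_congr
  intro b _
  by_cases h : b < mid
  · simp [h, ne_of_lt h]
  · simp [h]

theorem filter_gt_eq (mid : Int) (l : List Int) :
    l.filter (fun b => decide (mid < b)) = l.filter (fun b => b != mid && !decide (b < mid)) := by
  apply List.filter_congr
  intro b _
  rcases lt_trichotomy b mid with h | h | h
  · simp [h, not_lt.mpr (le_of_lt h)]
  · simp [h]
  · simp [h, ne_of_gt h, not_lt.mpr (le_of_lt h)]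

theorem loopB_frame (n : Nat) :
    ∀ (bs cs : List Int) (rest : List (List Int × List Int)) (res : List (Int × Int)),
    bs.length ≤ n →
    loopB ((bs, cs) :: rest) res = loopB rest (res ++ emparejar_botellas_corchos bs cs) := by
  induction n with
  | zero =>
    intro bs cs rest res h
    have : bs = [] := by rcases bs with _ | _ <;> simp_all
    subst this
    simp [loopB, emparejar_botellas_corchos]
  | succ n ih =>
    intro bs cs rest res h
    by_cases he : bs.isEmpty || cs.isEmpty
    · rw [loopB, if_pos he, emparejar_botellas_corchos, if_pos he]
      simp
    · by_cases h1 : bs.length == 1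
      · rw [loopB, if_neg he, if_pos h1, emparejar_botellas_corchos, if_neg he, if_pos h1]
        have hb : ¬ bs.isEmpty ∧ ¬ cs.isEmpty := by simpa using he
        rcases hb with ⟨hb1, hb2⟩
        rcases lt_trichotomy (cs.head?.getD 0) (bs.head?.getD 0) with hlt | heq | hgt
        · simp [probarCorcho, hlt, ne_of_gt hlt]
        · simp [probarCorcho, heq]
        · simp [probarCorcho, hgt, not_lt.mpr (le_of_lt hgt), ne_of_lt hgt]
      · rw [loopB, if_neg he, if_neg h1, emparejar_botellas_corchos, if_neg he, if_neg h1]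
        simp only []
        set mid := bs.getD (bs.length / 2) 0 with hmid
        have h0 : 0 < bs.length := by rcases bs with _ | _ <;> simp_all
        have hm : mid ∈ bs := getD_mem_of_lt (half_lt h0)
        have hL : (bs.filter (fun b => decide (b < mid))).length ≤ n := by
          have := length_filter_lt (p := fun b => decide (b < mid)) hm (by simp)
          omega
        have hR : (bs.filter (fun b => decide (mid < b))).length ≤ n := by
          have := length_filter_lt (p := fun b => decide (mid < b)) hm (by simp)
          omega
        rw [ih _ _ _ _ hL, ih _ _ _ _ hR]
        rw [splitCorchos_eq, splitBotellas_eq, ← filter_lt_eq, ← filter_gt_eq]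
        simp [List.append_assoc]

-- ===== VERDICT (by name: the statement is the Claim_ definition above) =====
theorem emparejar_botellas_corchos_spec : Claim_equal_emparejar_botellas_corchos := by
  intro botellas corchos _
  unfold Spec_emparejar_botellas_corchos emparejar_botellas_corchos_alt
  rw [loopB_frame botellas.length botellas corchos [] [] (le_refl _)]
  simp [loopB]
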